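-- pv_equiv track=rewrite | github.com/olegJF/Checkio | disconnected_users.py | disconnected_users
-- ===== SOURCE A (Python) =====
-- def dfs(_graph, start, visited=None):
--     if visited is None:
--         visited = set()
--     visited.add(start)
--     if start in _graph:
--         for next in _graph[start] - visited:
--             dfs(_graph, next, visited)
--     return visited
--
-- def disconnected_users(net, users, source, crushes):
--     new_net = []
--     for pair in net:
--         if pair[0] in crushes:
--             continue
--         elif pair[1] in crushes:
--             pair[1] = ''
--         new_net.append(pair)
--     graph = {i[0]: set() for i in new_net}
--     for pair in new_net:
--         if pair[1]:
--             graph[pair[0]].add(pair[1])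
--     available = dfs(graph, source)
--     if available == set(crushes):
--         available = []
--     return sum(val for key, val in users.items() if key not in available)
-- ===== SOURCE B (Python) =====
-- def disconnected_users(net, users, source, crushes):
--     # Edge-list fixpoint iteration instead of recursive DFS; does not mutate `net`
--     # (A sets pair[1]='' in place); return value is identical.
--     crush_set = set(crushes)
--     edges = []
--     for pair in net:
--         if pair[0] not in crush_set:
--             b = pair[1]
--             edges.append((pair[0], '' if b in crush_set else b))
--     visited = {source}
--     changed = True
--     while changed:
--         changed = False
--         for a, b in edges:
--             if b and a in visited and b not in visited:
--                 visited.add(b)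
--                 changed = True
--     if visited == crush_set:
--         visited = set()
--     return sum(v for k, v in users.items() if k not in visited)
-- ===== Notes on version B (the rewrite author's own statement) =====
-- stated objective: alternative
-- what changed: Replaces A's recursive DFS over a dict-of-sets graph (built in three passes with an in-place pair[1]='' mutation) by a single-pass filtered edge list plus an iterative sweep-until-fixpoint reachability loop; the crushes list is turned into a set once instead of being scanned per pair; B does not mutate net.
import Mathlib
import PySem

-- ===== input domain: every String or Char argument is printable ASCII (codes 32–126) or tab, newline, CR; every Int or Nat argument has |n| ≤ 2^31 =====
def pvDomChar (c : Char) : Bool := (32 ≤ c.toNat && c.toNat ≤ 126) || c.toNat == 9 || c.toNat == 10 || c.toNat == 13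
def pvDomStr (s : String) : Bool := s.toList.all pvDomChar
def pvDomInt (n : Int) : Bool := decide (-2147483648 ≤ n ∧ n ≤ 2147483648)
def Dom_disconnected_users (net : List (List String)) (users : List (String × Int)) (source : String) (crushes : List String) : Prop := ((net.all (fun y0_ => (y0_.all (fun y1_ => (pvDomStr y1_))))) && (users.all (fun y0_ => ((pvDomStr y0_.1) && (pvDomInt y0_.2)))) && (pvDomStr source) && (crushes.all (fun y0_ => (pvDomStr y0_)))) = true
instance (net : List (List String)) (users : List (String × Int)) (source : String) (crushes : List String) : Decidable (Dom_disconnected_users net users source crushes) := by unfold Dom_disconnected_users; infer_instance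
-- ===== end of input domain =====

-- B replaces A's recursive DFS over a dict-of-sets graph by an edge-list fixpoint
-- iteration (repeat sweeps until no new node is marked); same return value.
-- A mutates `net` in place (pair[1] = ''); B does not — the equivalence proved here
-- is about the return value only.

-- ===== PORT A =====
-- pair[0] / pair[1] (defaults are never used under Pre_)
def pvA0 (p : List String) : String := PySem.List.pyGetD p 0 ""
def pvA1 (p : List String) : String := PySem.List.pyGetD p 1 ""

-- the new_net filtering loop (with the in-place pair[1] = '' mutation)
def pvFilterA (crushes : List String) (net : List (List String)) : List (List String) :=
  net.foldl (fun newNet pair =>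
    if crushes.contains (pvA0 pair) then newNet
    else if crushes.contains (pvA1 pair) then newNet ++ [PySem.List.pySetD pair 1 ""]
    else newNet ++ [pair]) []

-- graph = {i[0]: set() for i in new_net}
def pvKeyStepA (d : PySem.Dict String (PySem.Set String)) (p : List String) : PySem.Dict String (PySem.Set String) :=
  d.insert (pvA0 p) PySem.Set.empty

-- for pair in new_net: if pair[1]: graph[pair[0]].add(pair[1])
def pvEdgeStepA (d : PySem.Dict String (PySem.Set String)) (p : List String) : PySem.Dict String (PySem.Set String) :=
  if pvA1 p ≠ "" then d.modify (pvA0 p) PySem.Set.empty (fun s => PySem.Set.add s (pvA1 p)) else d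

def pvGraphA (newNet : List (List String)) : PySem.Dict String (PySem.Set String) :=
  newNet.foldl pvEdgeStepA (newNet.foldl pvKeyStepA PySem.Dict.empty)

-- dfs(_graph, start, visited); the fuel argument only guards termination
def pvDfsA (graph : PySem.Dict String (PySem.Set String)) : Nat → String → PySem.Set String → PySem.Set String
  | 0, _, visited => visited
  | fuel+1, start, visited =>
    let visited := PySem.Set.add visited start
    match graph.get? start with
    | none => visited
    | some nbrs => (PySem.Set.diff nbrs visited).foldl (fun v n => pvDfsA graph fuel n v) visited

def disconnected_users (net : List (List String)) (users : List (String × Int)) (source : String) (crushes : List String) : Int :=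
  let newNet := pvFilterA crushes net
  let graph := pvGraphA newNet
  let fuel := 2 + 2 * (PySem.Dict.values graph).flatten.length
  let available := pvDfsA graph fuel source PySem.Set.empty
  let available := if PySem.Set.equal available (PySem.Set.ofList crushes) then [] else available
  let d := users.foldl (fun d kv => d.insert kv.1 kv.2) PySem.Dict.empty
  d.items.foldl (fun s kv => if available.contains kv.1 then s else s + kv.2) 0

-- ===== PORT B =====
-- filtered edge list: (pair[0], '' if pair[1] in crush_set else pair[1])
def pvEdgesB (crushSet : PySem.Set String) (net : List (List String)) : List (String × String) :=
  net.foldl (fun es pair =>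
    if crushSet.contains (PySem.List.pyGetD pair 0 "") then es
    else
      let b := PySem.List.pyGetD pair 1 ""
      es ++ [(PySem.List.pyGetD pair 0 "", if crushSet.contains b then "" else b)]) []

-- body of the inner `for a, b in edges` sweep
def pvStepB (vc : PySem.Set String × Bool) (e : String × String) : PySem.Set String × Bool :=
  if e.2 ≠ "" ∧ e.1 ∈ vc.1 ∧ e.2 ∉ vc.1
  then (PySem.Set.add vc.1 e.2, true) else vc

def pvSweepB (edges : List (String × String)) (visited : PySem.Set String) : PySem.Set String × Bool :=
  edges.foldl pvStepB (visited, false)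

-- termination helpers for the while-loop (cited by pvLoopB's decreasing_by)
def pvUnvis (edges : List (String × String)) (v : PySem.Set String) : Nat :=
  ((edges.map Prod.snd).toFinset.filter (fun t => ¬ t ∈ v)).card

theorem pvStepB_fold_mono (l : List (String × String)) (acc : PySem.Set String × Bool) :
    ∀ x ∈ acc.1, x ∈ (l.foldl pvStepB acc).1 := by
  induction l generalizing acc with
  | nil => exact fun x hx => hx
  | cons e l ih =>
    intro x hx
    apply ih
    unfold pvStepB
    split
    · exact (PySem.Set.mem_add _ _ _).mpr (Or.inl hx)
    · exact hx

theorem pvStepB_fold_progress (l : List (String × String)) (v : PySem.Set String)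
    (h : (l.foldl pvStepB (v, false)).2 = true) :
    ∃ t ∈ l.map Prod.snd, t ∉ v ∧ t ∈ (l.foldl pvStepB (v, false)).1 := by
  induction l generalizing v with
  | nil => simp at h
  | cons e l ih =>
    by_cases hc : e.2 ≠ "" ∧ e.1 ∈ v ∧ e.2 ∉ v
    · refine ⟨e.2, by simp, hc.2.2, ?_⟩
      have heq : (List.foldl pvStepB (v, false) (e :: l)).1
          = (List.foldl pvStepB (PySem.Set.add v e.2, true) l).1 := by
        rw [List.foldl_cons, pvStepB, if_pos hc]
      rw [heq]
      exact pvStepB_fold_mono l _ e.2 ((PySem.Set.mem_add _ _ _).mpr (Or.inr rfl))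
    · have hstep : pvStepB (v, false) e = (v, false) := by rw [pvStepB, if_neg hc]
      rw [List.foldl_cons, hstep] at h ⊢
      obtain ⟨t, ht, htv, htm⟩ := ih v h
      exact ⟨t, by simp [ht], htv, htm⟩

theorem pvUnvis_lt (edges : List (String × String)) (v : PySem.Set String)
    (h : (pvSweepB edges v).2 = true) : pvUnvis edges (pvSweepB edges v).1 < pvUnvis edges v := by
  obtain ⟨t, htmem, htv, htm⟩ := pvStepB_fold_progress edges v h
  have hmono := pvStepB_fold_mono edges (v, false)
  apply Finset.card_lt_card
  constructor
  · intro x hx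
    simp only [Finset.mem_filter, List.mem_toFinset] at hx ⊢
    exact ⟨hx.1, fun hxv => hx.2 (hmono x hxv)⟩
  · intro hsub
    have ht1 : t ∈ (edges.map Prod.snd).toFinset.filter (fun t => ¬ t ∈ v) := by
      simp only [Finset.mem_filter, List.mem_toFinset]
      exact ⟨htmem, htv⟩
    have := hsub ht1
    simp only [Finset.mem_filter] at this
    exact this.2 htm

-- while changed: changed = False; for a, b in edges: …
def pvLoopB (edges : List (String × String)) (visited : PySem.Set String) : PySem.Set String :=
  let r := pvSweepB edges visited
  if h : r.2 = true then pvLoopB edges r.1 else r.1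
termination_by pvUnvis edges visited
decreasing_by exact pvUnvis_lt edges visited h

def disconnected_users_alt (net : List (List String)) (users : List (String × Int)) (source : String) (crushes : List String) : Int :=
  let crushSet := PySem.Set.ofList crushes
  let edges := pvEdgesB crushSet net
  let visited := pvLoopB edges (PySem.Set.add PySem.Set.empty source)
  let visited := if PySem.Set.equal visited crushSet then [] else visited
  let d := users.foldl (fun d kv => d.insert kv.1 kv.2) PySem.Dict.empty
  d.items.foldl (fun s kv => if visited.contains kv.1 then s else s + kv.2) 0

-- ===== PRECONDITION & SPEC =====
-- Pre_ excludes exactly the inputs where Python A raises IndexError: a net pair of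
-- length < 2 whose first entry is not a crush (then pair[1] is read), or an empty pair.
def Pre_disconnected_users (net : List (List String)) (users : List (String × Int)) (source : String) (crushes : List String) : Prop :=
  ∀ pair ∈ net, 2 ≤ pair.length ∨ (pair.length = 1 ∧ pair.getD 0 "" ∈ crushes)
instance (net : List (List String)) (users : List (String × Int)) (source : String) (crushes : List String) : Decidable (Pre_disconnected_users net users source crushes) := by unfold Pre_disconnected_users; infer_instance

def pvWitness_disconnected_users : List (List String) × (List (String × Int)) × String × List String :=
  ([["a", "b"], ["b", "c"]], [("a", 1), ("c", 2)], "a", ["z"])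

def Spec_disconnected_users (net : List (List String)) (users : List (String × Int)) (source : String) (crushes : List String) (out : Int) : Prop := out = disconnected_users_alt net users source crushes
instance (net : List (List String)) (users : List (String × Int)) (source : String) (crushes : List String) (out : Int) : Decidable (Spec_disconnected_users net users source crushes out) := by unfold Spec_disconnected_users; infer_instance

-- ===== CLAIM (what is proved, stated in full; the proofs are below) =====
def Claim_equal_disconnected_users : Prop := ∀ (net : List (List String)) (users : List (String × Int)) (source : String) (crushes : List String), Dom_disconnected_users net users source crushes → Pre_disconnected_users net users source crushes → Spec_disconnected_users net users source crushes (disconnected_users net users source crushes)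

-- ===== LEMMAS AND PROOFS =====

-- reachability along an abstract edge relation
inductive pvReach (E : String → String → Prop) : String → String → Prop
  | refl (x : String) : pvReach E x x
  | step {x y z : String} : pvReach E x y → E y z → pvReach E x z

theorem pvReach_trans {E : String → String → Prop} {x y z : String}
    (h1 : pvReach E x y) (h2 : pvReach E y z) : pvReach E x z := by
  induction h2 with
  | refl => exact h1
  | step _ he ih => exact pvReach.step ih he

theorem pvReach_mono {E E' : String → String → Prop} (h : ∀ a b, E a b → E' a b)
    {x y : String} (hr : pvReach E x y) : pvReach E' x y := by
  induction hr with
  | refl => exact pvReach.refl _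
  | step _ he ih => exact pvReach.step ih (h _ _ he)

-- ---- A side: dict characterizations ----

theorem pvDict_getD_insert (d : PySem.Dict String (PySem.Set String)) (k x : String) (w : PySem.Set String) :
    (d.insert k w).getD x PySem.Set.empty
      = if x = k then w else d.getD x PySem.Set.empty := by
  by_cases h : x = k
  · subst h; simp [PySem.Dict.getD, PySem.Dict.get?_insert_self]
  · simp [PySem.Dict.getD, PySem.Dict.get?_insert_of_ne d w h, h]

theorem pvKeys_getD (l : List (List String)) (d : PySem.Dict String (PySem.Set String))
    (hd : ∀ z, d.getD z PySem.Set.empty = PySem.Set.empty) :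
    ∀ z, (l.foldl pvKeyStepA d).getD z PySem.Set.empty = PySem.Set.empty := by
  induction l generalizing d with
  | nil => exact hd
  | cons p l ih =>
    apply ih
    intro z
    unfold pvKeyStepA
    rw [pvDict_getD_insert]
    split
    · rfl
    · exact hd z

theorem pvGraph_getD_mem (l : List (List String)) (d : PySem.Dict String (PySem.Set String)) (x y : String) :
    y ∈ (l.foldl pvEdgeStepA d).getD x PySem.Set.empty
      ↔ y ∈ d.getD x PySem.Set.empty ∨ ∃ p ∈ l, pvA0 p = x ∧ pvA1 p = y ∧ pvA1 p ≠ "" := by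
  induction l generalizing d with
  | nil => simp
  | cons p l ih =>
    rw [List.foldl_cons, ih]
    by_cases h1 : pvA1 p = ""
    · have hd' : pvEdgeStepA d p = d := by rw [pvEdgeStepA, if_neg (by simp [h1])]
      rw [hd']
      constructor
      · rintro (h | ⟨q, hq, hh⟩)
        · exact Or.inl h
        · exact Or.inr ⟨q, List.mem_cons_of_mem p hq, hh⟩
      · rintro (h | ⟨q, hq, hh⟩)
        · exact Or.inl h
        · rcases List.mem_cons.mp hq with rfl | hq
          · exact absurd h1 hh.2.2
          · exact Or.inr ⟨q, hq, hh⟩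
    · have hd' : pvEdgeStepA d p
          = d.insert (pvA0 p) (PySem.Set.add (d.getD (pvA0 p) PySem.Set.empty) (pvA1 p)) := by
        rw [pvEdgeStepA, if_pos h1]; rfl
      rw [hd', pvDict_getD_insert]
      by_cases hx : x = pvA0 p
      · subst hx
        rw [if_pos rfl, PySem.Set.mem_add]
        constructor
        · rintro ((h | rfl) | ⟨q, hq, hh⟩)
          · exact Or.inl h
          · exact Or.inr ⟨p, List.mem_cons_self, rfl, rfl, h1⟩
          · exact Or.inr ⟨q, List.mem_cons_of_mem _ hq, hh⟩
        · rintro (h | ⟨q, hq, hh⟩)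
          · exact Or.inl (Or.inl h)
          · rcases List.mem_cons.mp hq with rfl | hq
            · exact Or.inl (Or.inr hh.2.1.symm)
            · exact Or.inr ⟨q, hq, hh⟩
      · rw [if_neg hx]
        constructor
        · rintro (h | ⟨q, hq, hh⟩)
          · exact Or.inl h
          · exact Or.inr ⟨q, List.mem_cons_of_mem _ hq, hh⟩
        · rintro (h | ⟨q, hq, hh⟩)
          · exact Or.inl h
          · rcases List.mem_cons.mp hq with rfl | hq
            · exact absurd hh.1 (fun he => hx he.symm)
            · exact Or.inr ⟨q, hq, hh⟩

-- adjacency relation of A's graph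
def pvAdjE (g : PySem.Dict String (PySem.Set String)) (a b : String) : Prop :=
  b ∈ g.getD a PySem.Set.empty

theorem pvAdj_sub_values (g : PySem.Dict String (PySem.Set String)) (a b : String)
    (h : pvAdjE g a b) : b ∈ (PySem.Dict.values g).flatten := by
  unfold pvAdjE PySem.Dict.getD at h
  cases hg : g.get? a with
  | none => rw [hg] at h; simp [PySem.Set.empty] at h
  | some nbrs =>
    rw [hg] at h
    refine List.mem_flatten.mpr ⟨nbrs, ?_, h⟩
    unfold PySem.Dict.get? at hg
    obtain ⟨pq, hpq, h2⟩ := Option.map_eq_some_iff.mp hg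
    exact List.mem_map.mpr ⟨pq, List.mem_of_find?_eq_some hpq, h2⟩

-- unfolding of one dfs call as a fold over the neighbour snapshot
theorem pvDfsA_succ (g : PySem.Dict String (PySem.Set String)) (fuel : Nat) (start : String) (v : PySem.Set String) :
    pvDfsA g (fuel+1) start v
      = (PySem.Set.diff (g.getD start PySem.Set.empty) (PySem.Set.add v start)).foldl
          (fun v n => pvDfsA g fuel n v) (PySem.Set.add v start) := by
  show (match g.get? start with
    | none => PySem.Set.add v start
    | some nbrs => (PySem.Set.diff nbrs (PySem.Set.add v start)).foldl (fun v n => pvDfsA g fuel n v) (PySem.Set.add v start)) = _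
  cases hg : g.get? start with
  | none => simp [PySem.Dict.getD, hg, PySem.Set.diff, PySem.Set.empty]
  | some nbrs => simp [PySem.Dict.getD, hg]

theorem pvDfsA_sound (g : PySem.Dict String (PySem.Set String)) (fuel : Nat) (start : String) (v : PySem.Set String) :
    ∀ x ∈ pvDfsA g fuel start v, x ∈ v ∨ pvReach (pvAdjE g) start x := by
  induction fuel generalizing start v with
  | zero => exact fun x hx => Or.inl hx
  | succ fuel ih =>
    rw [pvDfsA_succ]
    have hfold : ∀ (l : List String), (∀ n ∈ l, pvReach (pvAdjE g) start n) →
        ∀ (w : PySem.Set String), (∀ z ∈ w, z ∈ v ∨ pvReach (pvAdjE g) start z) →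
        ∀ x ∈ l.foldl (fun v n => pvDfsA g fuel n v) w, x ∈ v ∨ pvReach (pvAdjE g) start x := by
      intro l
      induction l with
      | nil => exact fun _ w hw x hx => hw x hx
      | cons n l ihl =>
        intro hl w hw x hx
        refine ihl (fun m hm => hl m (List.mem_cons_of_mem _ hm)) _ ?_ x hx
        intro z hz
        rcases ih n w z hz with hz' | hz'
        · exact hw z hz'
        · exact Or.inr (pvReach_trans (hl n List.mem_cons_self) hz')
    apply hfold
    · intro n hn
      exact pvReach.step (pvReach.refl start) ((PySem.Set.mem_diff _ _ _).mp hn).1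
    · intro z hz
      rcases (PySem.Set.mem_add v start z).mp hz with h | rfl
      · exact Or.inl h
      · exact Or.inr (pvReach.refl _)

-- the Finset of not-yet-visited potential nodes
def pvS (U : List String) (v : PySem.Set String) : Finset String :=
  U.toFinset.filter (fun t => ¬ t ∈ v)

def pvFuelOK (U : List String) (fuel : Nat) (start : String) (v : PySem.Set String) : Prop :=
  1 + 2 * (pvS U v).card + (if start ∈ v ∨ start ∉ U then 1 else 0) ≤ fuel

theorem pvS_card_mono (U : List String) {v w : PySem.Set String} (hvw : ∀ x ∈ v, x ∈ w) :
    (pvS U w).card ≤ (pvS U v).card := by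
  apply Finset.card_le_card
  intro x hx
  simp only [pvS, Finset.mem_filter, List.mem_toFinset] at hx ⊢
  exact ⟨hx.1, fun hxv => hx.2 (hvw x hxv)⟩

theorem pvS_card_lt (U : List String) {v w : PySem.Set String} (hvw : ∀ x ∈ v, x ∈ w)
    {t : String} (htU : t ∈ U) (htv : t ∉ v) (htw : t ∈ w) :
    (pvS U w).card < (pvS U v).card := by
  apply Finset.card_lt_card
  constructor
  · intro x hx
    simp only [pvS, Finset.mem_filter, List.mem_toFinset] at hx ⊢
    exact ⟨hx.1, fun hxv => hx.2 (hvw x hxv)⟩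
  · intro hsub
    have ht : t ∈ pvS U v := by
      simp only [pvS, Finset.mem_filter, List.mem_toFinset]; exact ⟨htU, htv⟩
    have h2 := hsub ht
    simp only [pvS, Finset.mem_filter] at h2
    exact h2.2 htw

theorem pvDfsA_closed (g : PySem.Dict String (PySem.Set String)) (fuel : Nat) (start : String) (v : PySem.Set String)
    (hfuel : pvFuelOK ((PySem.Dict.values g).flatten) fuel start v) :
    (∀ x ∈ v, x ∈ pvDfsA g fuel start v) ∧ start ∈ pvDfsA g fuel start v ∧
      (∀ x ∈ pvDfsA g fuel start v, x ∈ v ∨ ∀ y, pvAdjE g x y → y ∈ pvDfsA g fuel start v) := by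
  revert hfuel
  induction fuel generalizing start v with
  | zero =>
    intro hfuel
    exfalso
    unfold pvFuelOK at hfuel
    omega
  | succ fuel ih =>
    intro hfuel
    rw [pvDfsA_succ]
    set U := (PySem.Dict.values g).flatten with hU
    have hfold : ∀ (l : List String), (∀ n ∈ l, n ∈ U ∧ n ∉ v ∧ n ≠ start) →
        ∀ (w : PySem.Set String), (∀ z ∈ v, z ∈ w) → start ∈ w →
          (∀ x ∈ w, x ∈ l.foldl (fun v n => pvDfsA g fuel n v) w) ∧
          (∀ n ∈ l, n ∈ l.foldl (fun v n => pvDfsA g fuel n v) w) ∧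
          (∀ x ∈ l.foldl (fun v n => pvDfsA g fuel n v) w,
            x ∈ w ∨ ∀ y, pvAdjE g x y → y ∈ l.foldl (fun v n => pvDfsA g fuel n v) w) := by
      intro l
      induction l with
      | nil =>
        intro _ w _ _
        exact ⟨fun x hx => hx, by simp, fun x hx => Or.inl hx⟩
      | cons n l ihl =>
        intro hl w hvw hsw
        obtain ⟨hnU, hnv, hns⟩ := hl n List.mem_cons_self
        have hOK : pvFuelOK U fuel n w := by
          unfold pvFuelOK at hfuel ⊢
          by_cases hD : start ∈ v ∨ start ∉ U
          · rw [if_pos hD] at hfuel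
            by_cases hnw : n ∈ w
            · have hlt := pvS_card_lt U hvw hnU hnv hnw
              split_ifs <;> omega
            · have hle := pvS_card_mono U hvw
              have hcond : ¬ (n ∈ w ∨ n ∉ U) := by
                rintro (h | h)
                · exact hnw h
                · exact h hnU
              rw [if_neg hcond]
              omega
          · rw [if_neg hD] at hfuel
            rw [not_or, not_not] at hD
            have hlt := pvS_card_lt U hvw hD.2 hD.1 hsw
            split_ifs <;> omega
        obtain ⟨cmono, cstart, cclosed⟩ := ih n w hOK
        obtain ⟨imono, imem, iclosed⟩ := ihl (fun m hm => hl m (List.mem_cons_of_mem _ hm))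
          (pvDfsA g fuel n w) (fun z hz => cmono z (hvw z hz)) (cmono start hsw)
        rw [List.foldl_cons]
        refine ⟨?_, ?_, ?_⟩
        · exact fun x hx => imono x (cmono x hx)
        · intro m hm
          rcases List.mem_cons.mp hm with rfl | hm
          · exact imono m cstart
          · exact imem m hm
        · intro x hx
          rcases iclosed x hx with hx' | hcl
          · rcases cclosed x hx' with hx'' | hcl'
            · exact Or.inl hx''
            · exact Or.inr (fun y hy => imono y (hcl' y hy))
          · exact Or.inr hcl
    have hsnap : ∀ n ∈ PySem.Set.diff (g.getD start PySem.Set.empty) (PySem.Set.add v start),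
        n ∈ U ∧ n ∉ v ∧ n ≠ start := by
      intro n hn
      obtain ⟨h1, h2⟩ := (PySem.Set.mem_diff _ _ _).mp hn
      refine ⟨pvAdj_sub_values g start n h1, ?_, ?_⟩
      · exact fun h => h2 ((PySem.Set.mem_add _ _ _).mpr (Or.inl h))
      · exact fun h => h2 ((PySem.Set.mem_add _ _ _).mpr (Or.inr h))
    obtain ⟨fmono, fmem, fclosed⟩ := hfold _ hsnap (PySem.Set.add v start)
      (fun z hz => (PySem.Set.mem_add _ _ _).mpr (Or.inl hz))
      ((PySem.Set.mem_add _ _ _).mpr (Or.inr rfl))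
    refine ⟨?_, ?_, ?_⟩
    · exact fun x hx => fmono x ((PySem.Set.mem_add _ _ _).mpr (Or.inl hx))
    · exact fmono start ((PySem.Set.mem_add _ _ _).mpr (Or.inr rfl))
    · intro x hx
      rcases fclosed x hx with hx' | hcl
      · rcases (PySem.Set.mem_add _ _ _).mp hx' with hxv | heq
        · exact Or.inl hxv
        · subst heq
          refine Or.inr (fun y hy => ?_)
          by_cases hyw : y ∈ PySem.Set.add v x
          · exact fmono y hyw
          · exact fmem y ((PySem.Set.mem_diff _ _ _).mpr ⟨hy, hyw⟩)
      · exact Or.inr hcl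

theorem pvDfsA_reach (g : PySem.Dict String (PySem.Set String)) (x source : String) :
    x ∈ pvDfsA g (2 + 2 * (PySem.Dict.values g).flatten.length) source PySem.Set.empty
      ↔ pvReach (pvAdjE g) source x := by
  constructor
  · intro h
    rcases pvDfsA_sound g _ source PySem.Set.empty x h with h' | h'
    · simp [PySem.Set.empty] at h'
    · exact h'
  · intro hr
    have hOK : pvFuelOK ((PySem.Dict.values g).flatten)
        (2 + 2 * (PySem.Dict.values g).flatten.length) source PySem.Set.empty := by
      unfold pvFuelOK
      have h1 : (pvS ((PySem.Dict.values g).flatten) PySem.Set.empty).card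
          ≤ ((PySem.Dict.values g).flatten).length :=
        le_trans (Finset.card_filter_le _ _) (List.toFinset_card_le _)
      split_ifs <;> omega
    obtain ⟨hmono, hstart, hclosed⟩ := pvDfsA_closed g _ source PySem.Set.empty hOK
    induction hr with
    | refl => exact hstart
    | step h he ih2 =>
      rcases hclosed _ ih2 with h' | h'
      · simp [PySem.Set.empty] at h'
      · exact h' _ he

-- ---- B side ----

theorem pvStepB_fold_flag (l : List (String × String)) (acc : PySem.Set String × Bool)
    (h : acc.2 = true) : (l.foldl pvStepB acc).2 = true := by
  induction l generalizing acc with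
  | nil => exact h
  | cons e l ih =>
    apply ih
    unfold pvStepB
    split
    · rfl
    · exact h

theorem pvSweepB_fix (l : List (String × String)) (v v' : PySem.Set String)
    (h : l.foldl pvStepB (v, false) = (v', false)) :
    v' = v ∧ ∀ e ∈ l, e.2 ≠ "" → e.1 ∈ v → e.2 ∈ v := by
  induction l generalizing v with
  | nil => simp_all
  | cons e l ih =>
    by_cases hc : e.2 ≠ "" ∧ e.1 ∈ v ∧ e.2 ∉ v
    · exfalso
      have hne : (List.foldl pvStepB (v, false) (e :: l)).2 = true := by
        rw [List.foldl_cons, pvStepB, if_pos hc]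
        exact pvStepB_fold_flag l _ rfl
      rw [h] at hne; exact Bool.false_ne_true hne
    · have hstep : pvStepB (v, false) e = (v, false) := by rw [pvStepB, if_neg hc]
      rw [List.foldl_cons, hstep] at h
      obtain ⟨hv, hcl⟩ := ih v h
      refine ⟨hv, ?_⟩
      intro e' he' hne h1
      rcases List.mem_cons.mp he' with rfl | he'
      · by_contra h2
        exact hc ⟨hne, h1, h2⟩
      · exact hcl e' he' hne h1

theorem pvStepB_fold_sound (l edges : List (String × String)) (src : String)
    (hsub : ∀ e ∈ l, e ∈ edges) (acc : PySem.Set String × Bool)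
    (hacc : ∀ z ∈ acc.1, pvReach (fun a b => (a, b) ∈ edges ∧ b ≠ "") src z) :
    ∀ z ∈ (l.foldl pvStepB acc).1, pvReach (fun a b => (a, b) ∈ edges ∧ b ≠ "") src z := by
  induction l generalizing acc with
  | nil => exact hacc
  | cons e l ih =>
    refine ih (fun e' he' => hsub e' (List.mem_cons_of_mem e he')) _ ?_
    intro z hz
    by_cases hc : e.2 ≠ "" ∧ e.1 ∈ acc.1 ∧ e.2 ∉ acc.1
    · simp only [pvStepB, if_pos hc] at hz
      rcases (PySem.Set.mem_add _ _ _).mp hz with hz | rfl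
      · exact hacc z hz
      · exact pvReach.step (hacc e.1 hc.2.1) ⟨hsub e List.mem_cons_self, hc.1⟩
    · simp only [pvStepB, if_neg hc] at hz
      exact hacc z hz

theorem pvLoopB_mono (edges : List (String × String)) (v : PySem.Set String) :
    ∀ x ∈ v, x ∈ pvLoopB edges v := by
  induction v using pvLoopB.induct edges with
  | case1 v r hr ih =>
    intro x hx
    rw [pvLoopB, dif_pos hr]
    exact ih x (pvStepB_fold_mono edges (v, false) x hx)
  | case2 v r hr =>
    intro x hx
    rw [pvLoopB, dif_neg hr]
    exact pvStepB_fold_mono edges (v, false) x hx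

theorem pvLoopB_sound (edges : List (String × String)) (src : String) :
    ∀ (v : PySem.Set String), (∀ z ∈ v, pvReach (fun a b => (a, b) ∈ edges ∧ b ≠ "") src z) →
      ∀ x ∈ pvLoopB edges v, pvReach (fun a b => (a, b) ∈ edges ∧ b ≠ "") src x := by
  intro v
  induction v using pvLoopB.induct edges with
  | case1 v r hr ih =>
    intro hv x hx
    rw [pvLoopB, dif_pos hr] at hx
    exact ih (pvStepB_fold_sound edges edges src (fun e he => he) (v, false) hv) x hx
  | case2 v r hr =>
    intro hv x hx
    rw [pvLoopB, dif_neg hr] at hx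
    exact pvStepB_fold_sound edges edges src (fun e he => he) (v, false) hv x hx

theorem pvLoopB_closed (edges : List (String × String)) (v : PySem.Set String) :
    ∀ e ∈ edges, e.2 ≠ "" → e.1 ∈ pvLoopB edges v → e.2 ∈ pvLoopB edges v := by
  induction v using pvLoopB.induct edges with
  | case1 v r hr ih =>
    intro e he hne h1
    rw [pvLoopB, dif_pos hr] at h1 ⊢
    exact ih e he hne h1
  | case2 v r hr =>
    intro e he hne h1
    rw [pvLoopB, dif_neg hr] at h1 ⊢
    have h2 : (pvSweepB edges v).2 = false := by
      revert hr; cases (pvSweepB edges v).2 <;> simp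
    have h3 : List.foldl pvStepB (v, false) edges = ((pvSweepB edges v).1, false) := by
      conv_rhs => rw [← h2]
      rfl
    obtain ⟨hveq, hcl⟩ := pvSweepB_fix edges v (pvSweepB edges v).1 h3
    rw [hveq] at h1 ⊢
    exact hcl e he hne h1

theorem pvLoopB_reach (edges : List (String × String)) (src x : String) :
    x ∈ pvLoopB edges (PySem.Set.add PySem.Set.empty src)
      ↔ pvReach (fun a b => (a, b) ∈ edges ∧ b ≠ "") src x := by
  constructor
  · refine pvLoopB_sound edges src _ ?_ x
    intro z hz
    rcases (PySem.Set.mem_add _ _ _).mp hz with hz | rfl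
    · simp [PySem.Set.empty] at hz
    · exact pvReach.refl z
  · intro hr
    induction hr with
    | refl => exact pvLoopB_mono edges _ src ((PySem.Set.mem_add _ _ _).mpr (Or.inr rfl))
    | step h he ih =>
      exact pvLoopB_closed edges _ _ he.1 he.2 ih

-- ---- bridge: A's filtered pairs are B's edge list ----

theorem pvContains_ofList (l : List String) (x : String) :
    PySem.Set.contains (PySem.Set.ofList l) x = l.contains x := by
  rw [Bool.eq_iff_iff, PySem.Set.contains_iff, PySem.Set.mem_ofList, List.contains_iff_mem]

set_option maxHeartbeats 2000000 in
theorem pvFilter_fold_map (crushes : List String) (l : List (List String))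
    (hpre : ∀ pair ∈ l, 2 ≤ pair.length ∨ (pair.length = 1 ∧ pair.getD 0 "" ∈ crushes)) :
    ∀ (acc : List (List String)),
    (l.foldl (fun newNet pair =>
        if crushes.contains (pvA0 pair) then newNet
        else if crushes.contains (pvA1 pair) then newNet ++ [PySem.List.pySetD pair 1 ""]
        else newNet ++ [pair]) acc).map (fun p => (pvA0 p, pvA1 p))
      = l.foldl (fun es pair =>
          if (PySem.Set.ofList crushes).contains (PySem.List.pyGetD pair 0 "") then es
          else
            let b := PySem.List.pyGetD pair 1 ""
            es ++ [(PySem.List.pyGetD pair 0 "", if (PySem.Set.ofList crushes).contains b then "" else b)])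
          (acc.map (fun p => (pvA0 p, pvA1 p))) := by
  induction l with
  | nil => intro acc; rfl
  | cons p l ihl =>
    intro acc
    have hp := hpre p List.mem_cons_self
    have ihl' := ihl (fun q hq => hpre q (List.mem_cons_of_mem _ hq))
    rw [List.foldl_cons, List.foldl_cons]
    by_cases h0 : crushes.contains (pvA0 p) = true
    · rw [if_pos h0]
      have hB : (PySem.Set.ofList crushes).contains (PySem.List.pyGetD p 0 "") = true := by
        rw [pvContains_ofList]
        exact h0
      rw [if_pos hB]
      exact ihl' acc
    · have hlen : 2 ≤ p.length := by
        rcases hp with h | ⟨h1, h2⟩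
        · exact h
        · exfalso
          apply h0
          rw [List.contains_iff_mem]
          have : pvA0 p = p.getD 0 "" := by simp [pvA0, pysem]
          rw [this]
          exact h2
      obtain ⟨a, bb, t, rfl⟩ : ∃ a bb t, p = a :: bb :: t := by
        match p, hlen with
        | a :: bb :: t, _ => exact ⟨a, bb, t, rfl⟩
      have e0 : pvA0 (a :: bb :: t) = a := by simp [pvA0, pysem]
      have e1 : pvA1 (a :: bb :: t) = bb := by simp [pvA1, pysem]
      have e2 : PySem.List.pyGetD (a :: bb :: t) (0 : Int) "" = a := by simp [pysem]
      have e3 : PySem.List.pyGetD (a :: bb :: t) (1 : Int) "" = bb := by simp [pysem]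
      have e4 : PySem.List.pySetD (a :: bb :: t) (1 : Int) "" = a :: "" :: t := by simp [pysem]
      rw [e2, e3, e4, e0, e1]
      dsimp only
      rw [pvContains_ofList crushes a, pvContains_ofList crushes bb]
      rw [e0] at h0
      rw [if_neg h0, if_neg h0]
      by_cases h1 : crushes.contains bb = true
      · rw [if_pos h1, if_pos h1]
        rw [ihl' (acc ++ [a :: "" :: t])]
        have hmap : (acc ++ [a :: "" :: t]).map (fun p => (pvA0 p, pvA1 p))
            = acc.map (fun p => (pvA0 p, pvA1 p)) ++ [(a, "")] := by
          rw [List.map_append]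
          simp [pvA0, pvA1, pysem]
        rw [hmap]
      · rw [if_neg h1, if_neg h1]
        rw [ihl' (acc ++ [a :: bb :: t])]
        have hmap : (acc ++ [a :: bb :: t]).map (fun p => (pvA0 p, pvA1 p))
            = acc.map (fun p => (pvA0 p, pvA1 p)) ++ [(a, bb)] := by
          rw [List.map_append]
          simp [pvA0, pvA1, pysem]
        rw [hmap]

theorem pvFilter_map_edges (net : List (List String)) (crushes : List String)
    (hpre : ∀ pair ∈ net, 2 ≤ pair.length ∨ (pair.length = 1 ∧ pair.getD 0 "" ∈ crushes)) :
    (pvFilterA crushes net).map (fun p => (pvA0 p, pvA1 p))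
      = pvEdgesB (PySem.Set.ofList crushes) net := by
  unfold pvFilterA pvEdgesB
  exact pvFilter_fold_map crushes net hpre []

theorem pvContains_congr (va vb : List String) (hm : ∀ x, x ∈ va ↔ x ∈ vb) (k : String) :
    va.contains k = vb.contains k := by
  rw [Bool.eq_iff_iff, List.contains_iff_mem, List.contains_iff_mem]
  exact hm k

theorem pvSum_congr (items : List (String × Int)) (va vb : List String)
    (h : ∀ k, va.contains k = vb.contains k) :
    ∀ acc : Int,
      items.foldl (fun s kv => if va.contains kv.1 then s else s + kv.2) acc
        = items.foldl (fun s kv => if vb.contains kv.1 then s else s + kv.2) acc := by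
  induction items with
  | nil => intro acc; rfl
  | cons kv items ih =>
    intro acc
    rw [List.foldl_cons, List.foldl_cons, h kv.1]
    exact ih _

theorem pvEmpty_getD (z : String) :
    (PySem.Dict.empty : PySem.Dict String (PySem.Set String)).getD z PySem.Set.empty = PySem.Set.empty := rfl

theorem pvAdj_iff (net : List (List String)) (crushes : List String)
    (hpre : ∀ pair ∈ net, 2 ≤ pair.length ∨ (pair.length = 1 ∧ pair.getD 0 "" ∈ crushes))
    (a b : String) :
    pvAdjE (pvGraphA (pvFilterA crushes net)) a b
      ↔ ((a, b) ∈ pvEdgesB (PySem.Set.ofList crushes) net ∧ b ≠ "") := by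
  rw [← pvFilter_map_edges net crushes hpre]
  unfold pvAdjE pvGraphA
  rw [pvGraph_getD_mem]
  rw [pvKeys_getD _ _ pvEmpty_getD]
  constructor
  · rintro (h | ⟨p, hp, h0, h1, hne⟩)
    · simp [PySem.Set.empty] at h
    · subst h0; subst h1
      exact ⟨List.mem_map.mpr ⟨p, hp, rfl⟩, hne⟩
  · rintro ⟨hm, hne⟩
    obtain ⟨p, hp, hpf⟩ := List.mem_map.mp hm
    obtain ⟨h0, h1⟩ := Prod.mk.injEq .. ▸ hpf
    exact Or.inr ⟨p, hp, h0, h1, h1 ▸ hne⟩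

-- ===== VERDICT (by name: the statement is the Claim_ definition above) =====
theorem disconnected_users_spec : Claim_equal_disconnected_users := by
  intro net users source crushes _hdom hpre
  unfold Spec_disconnected_users disconnected_users disconnected_users_alt
  dsimp only
  have hadj := pvAdj_iff net crushes hpre
  have hmem : ∀ x, x ∈ pvDfsA (pvGraphA (pvFilterA crushes net))
      (2 + 2 * (PySem.Dict.values (pvGraphA (pvFilterA crushes net))).flatten.length) source PySem.Set.empty
      ↔ x ∈ pvLoopB (pvEdgesB (PySem.Set.ofList crushes) net) (PySem.Set.add PySem.Set.empty source) := by
    intro x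
    rw [pvDfsA_reach, pvLoopB_reach]
    constructor
    · exact pvReach_mono (fun a b h => (hadj a b).mp h)
    · exact pvReach_mono (fun a b h => (hadj a b).mpr h)
  set VA := pvDfsA (pvGraphA (pvFilterA crushes net))
      (2 + 2 * (PySem.Dict.values (pvGraphA (pvFilterA crushes net))).flatten.length) source PySem.Set.empty with hVA
  set VB := pvLoopB (pvEdgesB (PySem.Set.ofList crushes) net) (PySem.Set.add PySem.Set.empty source) with hVB
  have hceq : PySem.Set.equal VA (PySem.Set.ofList crushes) = PySem.Set.equal VB (PySem.Set.ofList crushes) := by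
    rw [Bool.eq_iff_iff, PySem.Set.equal_iff, PySem.Set.equal_iff]
    constructor
    · intro h x; rw [← hmem x]; exact h x
    · intro h x; rw [hmem x]; exact h x
  have hcont : ∀ k,
      (if PySem.Set.equal VA (PySem.Set.ofList crushes) then ([] : List String) else VA).contains k
        = (if PySem.Set.equal VB (PySem.Set.ofList crushes) then ([] : List String) else VB).contains k := by
    intro k
    rw [← hceq]
    by_cases h : PySem.Set.equal VA (PySem.Set.ofList crushes) = true
    · rw [if_pos h, if_pos h]
    · rw [if_neg h, if_neg h]
      exact pvContains_congr VA VB hmem k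
  exact pvSum_congr _ _ _ hcont 0
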